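-- pv_equiv track=rewrite | github.com/ariuk44/retake_exam_prep | day_10.py | isSequentiallyBounded
-- ===== SOURCE A (Python) =====
-- def isSequentiallyBounded(arr):
--     if len(arr) == 0:
--         return 0
--     i = 0
--     n = len(arr)
--     while i < n:
--         valeu = arr[i]
--         if valeu <= 0:
--             return 0
--         count = 0
--         while i < n and arr[i] == valeu:
--             count += 1
--             i += 1
--         if count >= valeu:
--             return 0
--         if i < n and arr[i] < valeu:
--             return 0
--     return 1
-- ===== SOURCE B (Python) =====
-- def isSequentiallyBounded(arr):
--     if not arr:
--         return 0
--     # materialize runs: list of [value, length]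
--     runs = []
--     for x in arr:
--         if runs and runs[-1][0] == x:
--             runs[-1][1] += 1
--         else:
--             runs.append([x, 1])
--     if any(v <= 0 or c >= v for v, c in runs):
--         return 0
--     if any(b[0] < a[0] for a, b in zip(runs, runs[1:])):
--         return 0
--     return 1
-- ===== Notes on version B (the rewrite author's own statement) =====
-- stated objective: alternative
-- what changed: Replaces A's shared-index nested-while scan with a two-phase decomposition: first materialize the list of (value, run-length) runs in one pass, then separately check every run for val<=0 or length>=val and every adjacent run pair for a strict decrease.
import Mathlib
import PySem

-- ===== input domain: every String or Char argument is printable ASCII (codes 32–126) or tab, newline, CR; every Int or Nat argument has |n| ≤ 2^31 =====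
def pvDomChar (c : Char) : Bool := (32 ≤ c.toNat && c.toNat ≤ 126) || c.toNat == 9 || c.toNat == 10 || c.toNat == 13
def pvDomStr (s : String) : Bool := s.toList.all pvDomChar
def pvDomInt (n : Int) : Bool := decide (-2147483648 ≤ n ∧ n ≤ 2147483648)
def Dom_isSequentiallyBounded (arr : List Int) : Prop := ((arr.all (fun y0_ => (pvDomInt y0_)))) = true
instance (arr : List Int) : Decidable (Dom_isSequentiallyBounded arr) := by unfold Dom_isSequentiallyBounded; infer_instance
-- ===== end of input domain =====

-- B builds the run list first, then checks runs and adjacent run pairs in separate passes;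
-- A scans with a shared index and nested while loops.  Return values proved equal on all inputs.

-- ===== PORT A =====

-- inner while loop: count the leading elements equal to v, return (count, rest of list)
def pvSpanRun (v : Int) : List Int → Int × List Int
  | [] => (0, [])
  | x :: xs =>
    if x = v then
      let (c, r) := pvSpanRun v xs
      (c + 1, r)
    else (0, x :: xs)

theorem pvSpanRun_snd_length_le (v : Int) (l : List Int) : (pvSpanRun v l).2.length ≤ l.length := by
  induction l with
  | nil => simp [pvSpanRun]
  | cons x xs ih =>
    simp only [pvSpanRun]
    split
    · simpa using Nat.le_succ_of_le ih
    · simp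

-- outer while loop of A, recursing on arr[i:]
def pvLoopA : List Int → Int
  | [] => 1
  | x :: t =>
    if x ≤ 0 then 0
    else
      let s := pvSpanRun x (x :: t)
      if s.1 ≥ x then 0
      else
        match hs : s.2 with
        | [] => 1
        | w :: ws => if w < x then 0 else pvLoopA (w :: ws)
termination_by l => l.length
decreasing_by
  have h := pvSpanRun_snd_length_le x t
  have hs2 : (pvSpanRun x (x :: t)).2 = (pvSpanRun x t).2 := by simp [pvSpanRun]
  rw [hs2] at hs
  rw [hs] at h
  simp only [List.length_cons] at *
  omega

def isSequentiallyBounded (arr : List Int) : Int :=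
  if arr.length = 0 then 0 else pvLoopA arr

-- ===== PORT B =====

-- one step of the run-building pass: extend the last run or append a new one
def pvAddRun (runs : List (Int × Int)) (x : Int) : List (Int × Int) :=
  match runs.getLast? with
  | some (v, c) => if v = x then runs.dropLast ++ [(v, c + 1)] else runs ++ [(x, 1)]
  | none => [(x, 1)]

def pvBuildRuns (arr : List Int) : List (Int × Int) := arr.foldl pvAddRun []

def isSequentiallyBounded_alt (arr : List Int) : Int :=
  if arr = [] then 0
  else
    let runs := pvBuildRuns arr
    if runs.any (fun p => p.1 ≤ 0 || p.2 ≥ p.1) then 0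
    else if (runs.zip runs.tail).any (fun p => p.2.1 < p.1.1) then 0
    else 1

-- ===== PRECONDITION & SPEC =====
def Spec_isSequentiallyBounded (arr : List Int) (out : Int) : Prop := out = isSequentiallyBounded_alt arr
instance (arr : List Int) (out : Int) : Decidable (Spec_isSequentiallyBounded arr out) := by unfold Spec_isSequentiallyBounded; infer_instance

-- ===== CLAIM (what is proved, stated in full; the proofs are below) =====
def Claim_equal_isSequentiallyBounded : Prop := ∀ (arr : List Int), Dom_isSequentiallyBounded arr → Spec_isSequentiallyBounded arr (isSequentiallyBounded arr)

-- ===== LEMMAS AND PROOFS =====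

-- groupby-style run list, defined by structural span recursion (proof-side characterisation)
def pvRunsOf : List Int → List (Int × Int)
  | [] => []
  | x :: t => (x, (pvSpanRun x t).1 + 1) :: pvRunsOf (pvSpanRun x t).2
termination_by l => l.length
decreasing_by
  have := pvSpanRun_snd_length_le x t
  simp only [List.length_cons]
  omega

-- consume: what foldl pvAddRun does when the accumulator ends with an open run (v, c)
def pvConsume (v c : Int) : List Int → List (Int × Int)
  | [] => [(v, c)]
  | x :: t => if x = v then pvConsume v (c + 1) t else (v, c) :: pvConsume x 1 t
termination_by l => l.length

theorem foldl_pvAddRun (l : List Int) : ∀ (acc : List (Int × Int)) (v c : Int),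
    l.foldl pvAddRun (acc ++ [(v, c)]) = acc ++ pvConsume v c l := by
  induction l with
  | nil => intro acc v c; simp [pvConsume]
  | cons x t ih =>
    intro acc v c
    simp only [List.foldl_cons, pvAddRun, pvConsume]
    simp only [List.getLast?_append, List.getLast?_singleton, Option.some_or]
    by_cases h : v = x
    · subst h
      rw [if_pos rfl, if_pos rfl, List.dropLast_concat]
      exact ih acc v (c + 1)
    · rw [if_neg h, if_neg (by omega)]
      rw [show acc ++ [(v, c)] ++ [(x, 1)] = (acc ++ [(v, c)]) ++ [(x, 1)] by simp]
      rw [ih (acc ++ [(v, c)]) x 1]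
      simp

theorem pvConsume_eq (l : List Int) : ∀ (v c : Int),
    pvConsume v c l = (v, c + (pvSpanRun v l).1) :: pvRunsOf (pvSpanRun v l).2 := by
  induction l with
  | nil => intro v c; simp [pvConsume, pvSpanRun, pvRunsOf]
  | cons x t ih =>
    intro v c
    simp only [pvConsume, pvSpanRun]
    by_cases h : x = v
    · subst h
      rw [if_pos rfl, if_pos rfl, ih x (c + 1)]
      have : c + 1 + (pvSpanRun x t).1 = c + ((pvSpanRun x t).1 + 1) := by ring
      simp [this]
    · rw [if_neg h, if_neg h, ih x 1]
      have : (1 : Int) + (pvSpanRun x t).1 = (pvSpanRun x t).1 + 1 := by ring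
      simp [pvRunsOf, this]

theorem pvBuildRuns_eq_runsOf (arr : List Int) : pvBuildRuns arr = pvRunsOf arr := by
  cases arr with
  | nil => simp [pvBuildRuns, pvRunsOf]
  | cons x t =>
    have h := foldl_pvAddRun t [] x 1
    simp only [List.nil_append] at h
    have hb : pvBuildRuns (x :: t) = pvConsume x 1 t := by
      simpa [pvBuildRuns, pvAddRun] using h
    rw [hb, pvConsume_eq]
    simp only [pvRunsOf]
    have : (1 : Int) + (pvSpanRun x t).1 = (pvSpanRun x t).1 + 1 := by ring
    rw [this]

-- sequential check over an explicit run list (A's control flow expressed on runs)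
def pvCheckRuns : List (Int × Int) → Int
  | [] => 1
  | [(v, c)] => if v ≤ 0 then 0 else if c ≥ v then 0 else 1
  | (v, c) :: (w, d) :: rs =>
    if v ≤ 0 then 0 else if c ≥ v then 0 else if w < v then 0 else pvCheckRuns ((w, d) :: rs)

theorem pvLoopA_eq_checkRuns_aux (n : Nat) : ∀ (l : List Int), l.length ≤ n →
    pvLoopA l = pvCheckRuns (pvRunsOf l) := by
  induction n with
  | zero =>
    intro l hl
    have : l = [] := by cases l <;> simp_all
    subst this
    simp [pvLoopA, pvRunsOf, pvCheckRuns]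
  | succ n ih =>
    intro l hl
    cases l with
    | nil => simp [pvLoopA, pvRunsOf, pvCheckRuns]
    | cons x t =>
      rw [pvLoopA]
      simp only [pvRunsOf]
      by_cases hx : x ≤ 0
      · rw [if_pos hx]
        cases hr : pvRunsOf (pvSpanRun x t).2 <;> simp [pvCheckRuns, hx]
      · rw [if_neg hx]
        by_cases hc : (pvSpanRun x t).1 + 1 ≥ x
        · rw [if_pos (by simp [pvSpanRun]; omega)]
          cases hr : pvRunsOf (pvSpanRun x t).2 <;> simp [pvCheckRuns, hx, hc]
        · rw [if_neg (by simp [pvSpanRun]; omega)]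
          have hlen : (pvSpanRun x t).2.length ≤ t.length := pvSpanRun_snd_length_le x t
          split
          · next heq =>
            have heq' : (pvSpanRun x t).2 = [] := by simpa [pvSpanRun] using heq
            rw [heq']
            simp [pvRunsOf, pvCheckRuns, hx, hc]
          · next w ws heq =>
            have heq' : (pvSpanRun x t).2 = w :: ws := by simpa [pvSpanRun] using heq
            rw [heq'] at hlen
            have hih : pvLoopA (w :: ws) = pvCheckRuns (pvRunsOf (w :: ws)) := by
              apply ih
              simp only [List.length_cons] at *
              omega
            rw [heq']
            by_cases hw : w < x
            · rw [if_pos hw]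
              simp [pvRunsOf, pvCheckRuns, hx, hc, hw]
            · rw [if_neg hw, hih]
              simp only [pvRunsOf, pvCheckRuns]
              rw [if_neg hx, if_neg (by simpa using hc), if_neg hw]

theorem pvLoopA_eq_checkRuns (l : List Int) : pvLoopA l = pvCheckRuns (pvRunsOf l) :=
  pvLoopA_eq_checkRuns_aux l.length l le_rfl

-- B's two separate any-passes compute pvCheckRuns
theorem pvCheckRuns_eq_passes (rs : List (Int × Int)) :
    pvCheckRuns rs =
      (if rs.any (fun p => p.1 ≤ 0 || p.2 ≥ p.1) then 0
       else if (rs.zip rs.tail).any (fun p => p.2.1 < p.1.1) then 0 else 1) := by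
  induction rs with
  | nil => simp [pvCheckRuns]
  | cons p rest ih =>
    obtain ⟨v, c⟩ := p
    cases rest with
    | nil =>
      simp only [pvCheckRuns, List.any_cons, List.any_nil, List.zip_nil_right]
      by_cases h1 : v ≤ 0 <;> by_cases h2 : c ≥ v <;> simp [h1, h2] <;> omega
    | cons q rest' =>
      obtain ⟨w, d⟩ := q
      simp only [pvCheckRuns, ih]
      simp only [List.any_cons, List.tail_cons, List.zip_cons_cons]
      by_cases h1 : v ≤ 0
      · simp [h1]
      · by_cases h2 : c ≥ v
        · simp [h1, h2, show ¬ (v ≤ 0) from h1]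
        · by_cases h3 : w < v
          · simp only [if_neg h1, if_neg h2, if_pos h3]
            by_cases h4 : ((w, d) :: rest').any (fun p => p.1 ≤ 0 || p.2 ≥ p.1) = true
            · simp only [List.any_cons] at h4
              simp [h1, h2, h3, h4, show ¬ (v ≤ 0) from h1, show ¬ (c ≥ v) from h2]
            · simp only [List.any_cons] at h4
              simp [h1, h2, h3, h4, show ¬ (v ≤ 0) from h1, show ¬ (c ≥ v) from h2]
          · have e1 : decide (v ≤ 0) = false := by simpa using h1
            have e2 : decide (c ≥ v) = false := by simpa using h2
            have e3 : decide (w < v) = false := by simpa using h3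
            rw [if_neg h1, if_neg h2, if_neg h3]
            simp only [e1, e2, e3, Bool.false_or]
            rfl

theorem pv_main (arr : List Int) : isSequentiallyBounded arr = isSequentiallyBounded_alt arr := by
  unfold isSequentiallyBounded isSequentiallyBounded_alt
  cases arr with
  | nil => simp
  | cons x t =>
    rw [if_neg (by simp : ¬ ((x :: t).length = 0)), if_neg (by simp : ¬ (x :: t = []))]
    rw [pvLoopA_eq_checkRuns, pvBuildRuns_eq_runsOf, pvCheckRuns_eq_passes]

-- ===== VERDICT (by name: the statement is the Claim_ definition above) =====
theorem isSequentiallyBounded_spec : Claim_equal_isSequentiallyBounded := by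
  intro arr _
  unfold Spec_isSequentiallyBounded
  exact pv_main arr
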